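-- pv_equiv track=rewrite | github.com/osegonte/sofascore-pipeline | src/live_scraper.py | _analyze_goals_by_15min_intervals
-- ===== SOURCE A (Python) =====
-- def _analyze_goals_by_15min_intervals(goal_minutes):
--     """Analyze goals by 15-minute intervals"""
--     intervals = {
--         '0-15': 0, '16-30': 0, '31-45': 0, '46-60': 0,
--         '61-75': 0, '76-90': 0, '90+': 0
--     }
--
--     for minute in goal_minutes:
--         if minute <= 15:
--             intervals['0-15'] += 1
--         elif minute <= 30:
--             intervals['16-30'] += 1
--         elif minute <= 45:
--             intervals['31-45'] += 1
--         elif minute <= 60: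
--             intervals['46-60'] += 1
--         elif minute <= 75:
--             intervals['61-75'] += 1
--         elif minute <= 90:
--             intervals['76-90'] += 1
--         else:
--             intervals['90+'] += 1
--
--     return intervals
-- ===== SOURCE B (Python) =====
-- def _analyze_goals_by_15min_intervals(goal_minutes):
--     """Analyze goals by 15-minute intervals"""
--     labels = ['0-15', '16-30', '31-45', '46-60', '61-75', '76-90', '90+']
--     # cumulative counts: cum[i] = number of goals at or before the i-th boundary
--     cum = [sum(1 for m in goal_minutes if m <= b) for b in (15, 30, 45, 60, 75, 90)]
--     cum.append(len(goal_minutes))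
--     counts = [cum[0]] + [cum[i] - cum[i - 1] for i in range(1, 7)]
--     return dict(zip(labels, counts))
-- ===== Notes on version B (the rewrite author's own statement) =====
-- stated objective: alternative
-- what changed: B never buckets individual minutes: it computes seven cumulative counts (goals at or before each interval boundary) by staged counting passes and recovers the per-interval counts as successive differences, whereas A selects a bucket per minute through a seven-way comparison cascade.
import Mathlib
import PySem

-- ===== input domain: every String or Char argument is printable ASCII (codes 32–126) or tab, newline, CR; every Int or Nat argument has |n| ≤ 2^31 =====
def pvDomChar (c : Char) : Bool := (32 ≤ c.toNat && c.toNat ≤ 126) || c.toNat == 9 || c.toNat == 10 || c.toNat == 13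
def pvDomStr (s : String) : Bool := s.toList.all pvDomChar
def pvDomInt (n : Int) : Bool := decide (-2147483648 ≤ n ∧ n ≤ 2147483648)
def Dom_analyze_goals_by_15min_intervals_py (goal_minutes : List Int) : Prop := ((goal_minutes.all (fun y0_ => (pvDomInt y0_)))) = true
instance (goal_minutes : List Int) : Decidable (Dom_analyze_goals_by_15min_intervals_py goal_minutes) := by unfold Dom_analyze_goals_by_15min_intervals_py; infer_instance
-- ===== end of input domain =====

-- B replaces A's per-minute seven-way bucketing with staged cumulative boundary counts and successive differencing (objective: alternative).


-- ===== PORT A =====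
def aStep (d : PySem.Dict String Int) (minute : Int) : PySem.Dict String Int :=
  if minute ≤ 15 then d.modify "0-15" 0 (· + 1)
  else if minute ≤ 30 then d.modify "16-30" 0 (· + 1)
  else if minute ≤ 45 then d.modify "31-45" 0 (· + 1)
  else if minute ≤ 60 then d.modify "46-60" 0 (· + 1)
  else if minute ≤ 75 then d.modify "61-75" 0 (· + 1)
  else if minute ≤ 90 then d.modify "76-90" 0 (· + 1)
  else d.modify "90+" 0 (· + 1)

def analyze_goals_by_15min_intervals_py (goal_minutes : List Int) : List (String × Int) :=
  (goal_minutes.foldl aStep (PySem.Dict.ofList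
    [("0-15", 0), ("16-30", 0), ("31-45", 0), ("46-60", 0),
     ("61-75", 0), ("76-90", 0), ("90+", 0)])).items

-- ===== PORT B =====
def bLabels : List String := ["0-15", "16-30", "31-45", "46-60", "61-75", "76-90", "90+"]

-- sum(1 for m in goal_minutes if m <= b)
def bCnt (goal_minutes : List Int) (b : Int) : Int :=
  goal_minutes.foldl (fun acc m => if m ≤ b then acc + 1 else acc) 0

def analyze_goals_by_15min_intervals_py_alt (goal_minutes : List Int) : List (String × Int) :=
  let cum := (([15, 30, 45, 60, 75, 90] : List Int).map (bCnt goal_minutes)) ++ [(goal_minutes.length : Int)]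
  let counts := [PySem.List.pyGetD cum 0 0] ++
    (PySem.List.pyRange 1 7 1).map (fun i => PySem.List.pyGetD cum i 0 - PySem.List.pyGetD cum (i - 1) 0)
  bLabels.zip counts

-- ===== PRECONDITION & SPEC =====
def Spec_analyze_goals_by_15min_intervals_py (goal_minutes : List Int) (out : List (String × Int)) : Prop := out = analyze_goals_by_15min_intervals_py_alt goal_minutes
instance (goal_minutes : List Int) (out : List (String × Int)) : Decidable (Spec_analyze_goals_by_15min_intervals_py goal_minutes out) := by unfold Spec_analyze_goals_by_15min_intervals_py; infer_instance

-- ===== CLAIM (what is proved, stated in full; the proofs are below) =====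
def Claim_equal_analyze_goals_by_15min_intervals_py : Prop := ∀ (goal_minutes : List Int), Dom_analyze_goals_by_15min_intervals_py goal_minutes → Spec_analyze_goals_by_15min_intervals_py goal_minutes (analyze_goals_by_15min_intervals_py goal_minutes)

-- ===== LEMMAS AND PROOFS =====

lemma bCnt_shift (b : Int) (l : List Int) : ∀ acc : Int,
    l.foldl (fun acc m => if m ≤ b then acc + 1 else acc) acc
      = acc + l.foldl (fun acc m => if m ≤ b then acc + 1 else acc) 0 := by
  induction l with
  | nil => intro acc; simp
  | cons m t ih =>
    intro acc
    simp only [List.foldl_cons]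
    rw [ih (if m ≤ b then acc + 1 else acc), ih (if m ≤ b then (0:Int) + 1 else 0)]
    split <;> ring

lemma bCnt_cons (m : Int) (t : List Int) (b : Int) :
    bCnt (m :: t) b = (if m ≤ b then 1 else 0) + bCnt t b := by
  simp only [bCnt, List.foldl_cons]
  rw [bCnt_shift]
  split <;> ring

lemma alt_eval (gs : List Int) : analyze_goals_by_15min_intervals_py_alt gs =
    [("0-15", bCnt gs 15), ("16-30", bCnt gs 30 - bCnt gs 15),
     ("31-45", bCnt gs 45 - bCnt gs 30), ("46-60", bCnt gs 60 - bCnt gs 45),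
     ("61-75", bCnt gs 75 - bCnt gs 60), ("76-90", bCnt gs 90 - bCnt gs 75),
     ("90+", (gs.length : Int) - bCnt gs 90)] := by
  rfl

lemma loop_eq (l : List Int) : ∀ a b c d e f g : Int,
    (l.foldl aStep (PySem.Dict.mk
      [("0-15", a), ("16-30", b), ("31-45", c), ("46-60", d),
       ("61-75", e), ("76-90", f), ("90+", g)])).items
    = [("0-15", a + bCnt l 15), ("16-30", b + (bCnt l 30 - bCnt l 15)),
       ("31-45", c + (bCnt l 45 - bCnt l 30)), ("46-60", d + (bCnt l 60 - bCnt l 45)),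
       ("61-75", e + (bCnt l 75 - bCnt l 60)), ("76-90", f + (bCnt l 90 - bCnt l 75)),
       ("90+", g + ((l.length : Int) - bCnt l 90))] := by
  induction l with
  | nil => intro a b c d e f g; simp [bCnt]
  | cons m t ih =>
    intro a b c d e f g
    simp only [List.foldl_cons]
    have key : ∀ b' : Int, m ≤ b' → bCnt (m :: t) b' = 1 + bCnt t b' := by
      intro b' h; rw [bCnt_cons]; simp [h]
    have key' : ∀ b' : Int, ¬ m ≤ b' → bCnt (m :: t) b' = bCnt t b' := by
      intro b' h; rw [bCnt_cons]; simp [h]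
    by_cases h1 : m ≤ 15
    · have hA : aStep (PySem.Dict.mk
          [("0-15", a), ("16-30", b), ("31-45", c), ("46-60", d), ("61-75", e), ("76-90", f), ("90+", g)]) m
          = PySem.Dict.mk [("0-15", a + 1), ("16-30", b), ("31-45", c), ("46-60", d), ("61-75", e), ("76-90", f), ("90+", g)] := by
        simp [aStep, h1, PySem.Dict.modify, PySem.Dict.contains, PySem.Dict.getD,
          PySem.Dict.get?, PySem.Dict.insert]
      rw [hA, ih]
      simp only [key 15 h1, key 30 (by omega), key 45 (by omega), key 60 (by omega),
        key 75 (by omega), key 90 (by omega), List.length_cons, List.cons.injEq,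
        Prod.mk.injEq, true_and, and_true]
      push_cast
      omega
    · by_cases h2 : m ≤ 30
      · have hA : aStep (PySem.Dict.mk
            [("0-15", a), ("16-30", b), ("31-45", c), ("46-60", d), ("61-75", e), ("76-90", f), ("90+", g)]) m
            = PySem.Dict.mk [("0-15", a), ("16-30", b + 1), ("31-45", c), ("46-60", d), ("61-75", e), ("76-90", f), ("90+", g)] := by
          simp [aStep, h1, h2, PySem.Dict.modify, PySem.Dict.contains, PySem.Dict.getD,
            PySem.Dict.get?, PySem.Dict.insert]
        rw [hA, ih]
        simp only [key' 15 h1, key 30 h2, key 45 (by omega), key 60 (by omega),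
          key 75 (by omega), key 90 (by omega), List.length_cons, List.cons.injEq,
          Prod.mk.injEq, true_and, and_true]
        push_cast
        omega
      · by_cases h3 : m ≤ 45
        · have hA : aStep (PySem.Dict.mk
              [("0-15", a), ("16-30", b), ("31-45", c), ("46-60", d), ("61-75", e), ("76-90", f), ("90+", g)]) m
              = PySem.Dict.mk [("0-15", a), ("16-30", b), ("31-45", c + 1), ("46-60", d), ("61-75", e), ("76-90", f), ("90+", g)] := by
            simp [aStep, h1, h2, h3, PySem.Dict.modify, PySem.Dict.contains, PySem.Dict.getD,
              PySem.Dict.get?, PySem.Dict.insert]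
          rw [hA, ih]
          simp only [key' 15 h1, key' 30 h2, key 45 h3, key 60 (by omega),
            key 75 (by omega), key 90 (by omega), List.length_cons, List.cons.injEq,
            Prod.mk.injEq, true_and, and_true]
          push_cast
          omega
        · by_cases h4 : m ≤ 60
          · have hA : aStep (PySem.Dict.mk
                [("0-15", a), ("16-30", b), ("31-45", c), ("46-60", d), ("61-75", e), ("76-90", f), ("90+", g)]) m
                = PySem.Dict.mk [("0-15", a), ("16-30", b), ("31-45", c), ("46-60", d + 1), ("61-75", e), ("76-90", f), ("90+", g)] := by
              simp [aStep, h1, h2, h3, h4, PySem.Dict.modify, PySem.Dict.contains, PySem.Dict.getD,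
                PySem.Dict.get?, PySem.Dict.insert]
            rw [hA, ih]
            simp only [key' 15 h1, key' 30 h2, key' 45 h3, key 60 h4,
              key 75 (by omega), key 90 (by omega), List.length_cons, List.cons.injEq,
              Prod.mk.injEq, true_and, and_true]
            push_cast
            omega
          · by_cases h5 : m ≤ 75
            · have hA : aStep (PySem.Dict.mk
                  [("0-15", a), ("16-30", b), ("31-45", c), ("46-60", d), ("61-75", e), ("76-90", f), ("90+", g)]) m
                  = PySem.Dict.mk [("0-15", a), ("16-30", b), ("31-45", c), ("46-60", d), ("61-75", e + 1), ("76-90", f), ("90+", g)] := by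
                simp [aStep, h1, h2, h3, h4, h5, PySem.Dict.modify, PySem.Dict.contains, PySem.Dict.getD,
                  PySem.Dict.get?, PySem.Dict.insert]
              rw [hA, ih]
              simp only [key' 15 h1, key' 30 h2, key' 45 h3, key' 60 h4,
                key 75 h5, key 90 (by omega), List.length_cons, List.cons.injEq,
                Prod.mk.injEq, true_and, and_true]
              push_cast
              omega
            · by_cases h6 : m ≤ 90
              · have hA : aStep (PySem.Dict.mk
                    [("0-15", a), ("16-30", b), ("31-45", c), ("46-60", d), ("61-75", e), ("76-90", f), ("90+", g)]) m
                    = PySem.Dict.mk [("0-15", a), ("16-30", b), ("31-45", c), ("46-60", d), ("61-75", e), ("76-90", f + 1), ("90+", g)] := by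
                  simp [aStep, h1, h2, h3, h4, h5, h6, PySem.Dict.modify, PySem.Dict.contains, PySem.Dict.getD,
                    PySem.Dict.get?, PySem.Dict.insert]
                rw [hA, ih]
                simp only [key' 15 h1, key' 30 h2, key' 45 h3, key' 60 h4,
                  key' 75 h5, key 90 h6, List.length_cons, List.cons.injEq,
                  Prod.mk.injEq, true_and, and_true]
                push_cast
                omega
              · have hA : aStep (PySem.Dict.mk
                    [("0-15", a), ("16-30", b), ("31-45", c), ("46-60", d), ("61-75", e), ("76-90", f), ("90+", g)]) m
                    = PySem.Dict.mk [("0-15", a), ("16-30", b), ("31-45", c), ("46-60", d), ("61-75", e), ("76-90", f), ("90+", g + 1)] := by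
                  simp [aStep, h1, h2, h3, h4, h5, h6, PySem.Dict.modify, PySem.Dict.contains, PySem.Dict.getD,
                    PySem.Dict.get?, PySem.Dict.insert]
                rw [hA, ih]
                simp only [key' 15 h1, key' 30 h2, key' 45 h3, key' 60 h4,
                  key' 75 h5, key' 90 h6, List.length_cons, List.cons.injEq,
                  Prod.mk.injEq, true_and, and_true]
                push_cast
                omega

-- ===== VERDICT (by name: the statement is the Claim_ definition above) =====
theorem analyze_goals_by_15min_intervals_py_spec : Claim_equal_analyze_goals_by_15min_intervals_py := by
  intro gs _
  unfold Spec_analyze_goals_by_15min_intervals_py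
  rw [alt_eval]
  unfold analyze_goals_by_15min_intervals_py
  rw [show (PySem.Dict.ofList
    [("0-15", (0:Int)), ("16-30", 0), ("31-45", 0), ("46-60", 0),
     ("61-75", 0), ("76-90", 0), ("90+", 0)]) = PySem.Dict.mk
    [("0-15", 0), ("16-30", 0), ("31-45", 0), ("46-60", 0),
     ("61-75", 0), ("76-90", 0), ("90+", 0)] from by decide]
  rw [loop_eq]
  norm_num
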